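-- pv_equiv track=rewrite | github.com/Sajid576/problem-solving-in-python | interview/brain_station/B.py | result
-- ===== SOURCE A (Python) =====
-- def isPowerofTwo(n):
--
--     if (n == 0):
--         return 0
--     if ((n & (~(n - 1))) == n):
--         return 1
--     return 0
--
-- def result(t):
--     summ = 0
--
--     for i in range(1, t+1):
--         if(isPowerofTwo(i)):
--             summ -= i
--         else:
--             summ += i
--     return summ
-- ===== SOURCE B (Python) =====
-- def result(t):
--     # O(1) closed form: triangle number minus twice the sum of all powers of two <= t
--     # (each power of two i in 1..t contributes -i instead of +i, i.e. subtract 2*i).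
--     if t < 1:
--         return 0
--     return t * (t + 1) // 2 - 2 * (2 ** t.bit_length() - 1)
-- ===== Notes on version B (the rewrite author's own statement) =====
-- stated objective: faster
-- what changed: Replaced the O(t) loop with per-element power-of-two bit tests by an O(1) closed form: t(t+1)/2 minus twice the sum 2^bit_length(t)-1 of all powers of two up to t.
import Mathlib
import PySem

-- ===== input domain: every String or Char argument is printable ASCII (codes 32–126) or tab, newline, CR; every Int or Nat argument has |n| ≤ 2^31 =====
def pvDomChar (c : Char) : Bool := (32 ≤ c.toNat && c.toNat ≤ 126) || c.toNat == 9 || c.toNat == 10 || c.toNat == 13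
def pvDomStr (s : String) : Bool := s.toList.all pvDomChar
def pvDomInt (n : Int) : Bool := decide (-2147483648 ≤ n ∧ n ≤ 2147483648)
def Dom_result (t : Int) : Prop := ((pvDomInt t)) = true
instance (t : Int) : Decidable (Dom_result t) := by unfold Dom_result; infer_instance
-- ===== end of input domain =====

-- B replaces A's O(t) loop (a power-of-two bit test per element) by the O(1) closed form
-- t(t+1)//2 - 2*(2^bit_length(t) - 1).

-- ===== PORT A =====
def isPowerofTwo (n : Int) : Int :=
  if n == 0 then 0
  else if PySem.Int.band n (Int.not (n - 1)) == n then 1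
  else 0

def result (t : Int) : Int :=
  (PySem.List.pyRange 1 (t + 1) 1).foldl
    (fun summ i => if isPowerofTwo i ≠ 0 then summ - i else summ + i) 0

-- ===== PORT B =====
def result_alt (t : Int) : Int :=
  if t < 1 then 0
  else PySem.Int.floordiv (t * (t + 1)) 2 - 2 * ((2 : Int) ^ PySem.Int.bitLength t - 1)

-- ===== PRECONDITION & SPEC =====
def Spec_result (t : Int) (out : Int) : Prop := out = result_alt t
instance (t : Int) (out : Int) : Decidable (Spec_result t out) := by unfold Spec_result; infer_instance

-- ===== CLAIM (what is proved, stated in full; the proofs are below) =====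
def Claim_equal_result : Prop := ∀ (t : Int), Dom_result t → Spec_result t (result t)

-- ===== LEMMAS AND PROOFS =====

-- A's bit test 'n & ~(n-1) == n' evaluated over Nat
theorem band_eval (m : Nat) (h : 1 ≤ m) :
    PySem.Int.band (↑m) (Int.not ((↑m : Int) - 1)) = ↑(m - (m &&& (m - 1))) := by
  have h1 : (↑m : Int) - 1 = ((m - 1 : Nat) : Int) := by omega
  rw [h1]
  simp [PySem.Int.band, Int.not, Int.negSucc_eq]
  intro hc
  exfalso
  omega

theorem isPow_iff (m : Nat) (h : 1 ≤ m) :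
    (isPowerofTwo ↑m ≠ 0) ↔ m &&& (m - 1) = 0 := by
  unfold isPowerofTwo
  have hz : ((↑m : Int) == 0) = false := by
    simp only [beq_eq_false_iff_ne, ne_eq, Nat.cast_eq_zero]; omega
  rw [hz, band_eval m h]
  have hle : m &&& (m - 1) ≤ m := Nat.and_le_left
  by_cases hq : m &&& (m - 1) = 0
  · simp [hq]
  · have : m - (m &&& (m - 1)) ≠ m := by omega
    simp [this, hq]

-- m & (m-1) = 0 characterises the powers of two (for m ≥ 1)
theorem and_pred_iff (m : Nat) (h : 1 ≤ m) :
    m &&& (m - 1) = 0 ↔ ∃ k, m = 2 ^ k := by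
  induction m using Nat.strong_induction_on with
  | _ m ih =>
    match m, h with
    | 1, _ => simpa using ⟨0, rfl⟩
    | (m + 2), _ =>
      rcases Nat.even_or_odd (m + 2) with he | ho
      · obtain ⟨j, hj⟩ := he
        have hj2 : m + 2 = 2 * j := by omega
        have hj1 : 1 ≤ j := by omega
        have hbit : (2 * j) &&& (2 * j - 1) = 2 * (j &&& (j - 1)) := by
          have h2 : 2 * j - 1 = 2 * (j - 1) + 1 := by omega
          have hlb := Nat.land_bit false j true (j - 1)
          simpa [Nat.bit, h2] using hlb
        rw [hj2, hbit]
        have ihj := ih j (by omega) hj1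
        constructor
        · intro hz
          obtain ⟨k, hk⟩ := ihj.mp (by omega)
          exact ⟨k + 1, by rw [hk]; ring⟩
        · rintro ⟨k, hk⟩
          have hk1 : 1 ≤ k := by
            by_contra hc
            have hk0 : k = 0 := by omega
            subst hk0
            simp at hk
          have : j = 2 ^ (k - 1) := by
            have : 2 * 2 ^ (k - 1) = 2 ^ k := by
              rw [← pow_succ']; congr 1; omega
            omega
          have := ihj.mpr ⟨k - 1, this⟩
          omega
      · obtain ⟨j, hj⟩ := ho
        have hj1 : 1 ≤ j := by omega
        have hbit : (2 * j + 1) &&& (2 * j) = 2 * j := by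
          have := Nat.land_bit true j false j
          simpa [Nat.bit] using this
        have h2 : 2 * j + 1 - 1 = 2 * j := by omega
        rw [hj, h2, hbit]
        constructor
        · intro hz; omega
        · rintro ⟨k, hk⟩
          exfalso
          have hk1 : 1 ≤ k := by
            by_contra hc
            have hk0 : k = 0 := by omega
            subst hk0
            simp at hk
            omega
          have : 2 ∣ 2 ^ k := dvd_pow_self 2 (by omega)
          omega

-- bitLength is the unique L with 2^(L-1) ≤ m < 2^L
theorem bitLength_unique (m a : Nat) (h1 : 2 ^ a ≤ m) (h2 : m < 2 ^ (a + 1)) :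
    PySem.Int.bitLength (↑m : Int) = a + 1 := by
  have hm1 : 1 ≤ m := le_trans (Nat.one_le_two_pow) h1
  have hne : (↑m : Int) ≠ 0 := by exact_mod_cast Nat.one_le_iff_ne_zero.mp hm1
  have hlt := PySem.Int.lt_two_pow_bitLength (↑m : Int)
  have hle := PySem.Int.two_pow_bitLength_le (↑m : Int) hne
  rw [Int.natAbs_natCast] at hlt hle
  set L := PySem.Int.bitLength (↑m : Int) with hL
  have ha : a < L := by
    by_contra hc
    have hc' : L ≤ a := by omega
    have := Nat.pow_le_pow_right (by norm_num : 1 ≤ 2) hc'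
    omega
  have hb : L - 1 ≤ a := by
    by_contra hc
    have := Nat.pow_le_pow_right (by norm_num : 1 ≤ 2) (show a + 1 ≤ L - 1 by omega)
    omega
  omega

theorem bitLength_pow (k : Nat) :
    PySem.Int.bitLength ((2 ^ k : Nat) : Int) = k + 1 :=
  bitLength_unique _ k le_rfl (Nat.pow_lt_pow_right (by norm_num) (by omega))

theorem bitLength_pow_pred (k : Nat) :
    PySem.Int.bitLength ((2 ^ k - 1 : Nat) : Int) = k := by
  cases k with
  | zero => simp [PySem.Int.bitLength_zero]
  | succ k' =>
    have he : 2 ^ (k' + 1) = 2 * 2 ^ k' := by rw [← pow_succ']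
    have h1 : 2 ^ k' ≤ 2 ^ (k' + 1) - 1 := by
      have := Nat.one_le_two_pow (n := k')
      omega
    have h2 : 2 ^ (k' + 1) - 1 < 2 ^ (k' + 1) := by
      have := Nat.one_le_two_pow (n := k' + 1)
      omega
    exact bitLength_unique _ k' h1 h2

theorem bitLength_nonpow (m : Nat) (h2 : 2 ≤ m) (hnp : ¬ ∃ k, m = 2 ^ k) :
    PySem.Int.bitLength (↑m : Int) = PySem.Int.bitLength ((m - 1 : Nat) : Int) := by
  have hm1 : 1 ≤ m - 1 := by omega
  have hne : ((m - 1 : Nat) : Int) ≠ 0 := by exact_mod_cast Nat.one_le_iff_ne_zero.mp hm1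
  have hlt := PySem.Int.lt_two_pow_bitLength ((m - 1 : Nat) : Int)
  have hle := PySem.Int.two_pow_bitLength_le ((m - 1 : Nat) : Int) hne
  rw [Int.natAbs_natCast] at hlt hle
  set L := PySem.Int.bitLength ((m - 1 : Nat) : Int) with hL
  have hL1 : 1 ≤ L := by
    by_contra hc
    have : L = 0 := by omega
    rw [this] at hlt
    simp at hlt
    omega
  have hmne : m ≠ 2 ^ L := fun he => hnp ⟨L, he⟩
  have h1 : 2 ^ (L - 1) ≤ m := by omega
  have h2' : m < 2 ^ L := by omega
  have := bitLength_unique m (L - 1) h1 (by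
    have : L - 1 + 1 = L := by omega
    rw [this]; exact h2')
  omega

-- closed form of B, extended to 0
theorem result_alt_eq (n : Nat) :
    result_alt ↑n =
      ((n : Int) * (↑n + 1)) / 2 - 2 * ((2 : Int) ^ PySem.Int.bitLength (↑n : Int) - 1) := by
  cases Nat.eq_zero_or_pos n with
  | inl h => subst h; simp [result_alt, PySem.Int.bitLength_zero]
  | inr h =>
    have hlt : ¬ ((n : Int) < 1) := by omega
    rw [result_alt, if_neg hlt, PySem.Int.floordiv_eq_ediv_of_pos (by norm_num)]

-- triangle-number step
theorem tri_step (m : Nat) (h : 1 ≤ m) :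
    ((m : Int) * (↑m + 1)) / 2 = (((m - 1 : Nat) : Int) * ↑m) / 2 + ↑m := by
  have h1 : ((m - 1 : Nat) : Int) = ↑m - 1 := by omega
  have e : (m : Int) * (↑m + 1) = ((m - 1 : Nat) : Int) * ↑m + ↑m * 2 := by
    rw [h1]; ring
  rw [e, Int.add_mul_ediv_right _ _ (by norm_num : (2 : Int) ≠ 0)]

-- B satisfies A's loop recurrence
theorem cf_step (m : Nat) (h : 1 ≤ m) :
    result_alt ↑m
      = result_alt ((m - 1 : Nat) : Int)
        + (if m &&& (m - 1) = 0 then -(↑m : Int) else ↑m) := by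
  rw [result_alt_eq m, result_alt_eq (m - 1), tri_step m h]
  have hc1 : ((m - 1 : Nat) : Int) + 1 = (m : Int) := by omega
  rw [hc1]
  generalize (((m - 1 : Nat) : Int) * (m : Int)) / 2 = D
  by_cases hp : m &&& (m - 1) = 0
  · obtain ⟨k, rfl⟩ := (and_pred_iff m h).mp hp
    rw [bitLength_pow k, bitLength_pow_pred k, if_pos hp]
    push_cast
    ring
  · have hne1 : m ≠ 1 := fun e => hp (by subst e; decide)
    have hm2 : 2 ≤ m := by omega
    have hnp : ¬ ∃ k, m = 2 ^ k := fun he => hp ((and_pred_iff m h).mpr he)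
    rw [bitLength_nonpow m hm2 hnp, if_neg hp]
    ring

-- A's loop recurrence
theorem result_step (n : Nat) :
    result ↑(n + 1)
      = result ↑n + (if isPowerofTwo ↑(n + 1) ≠ 0 then -((n + 1 : Nat) : Int) else ↑(n + 1)) := by
  unfold result
  have hsplit : PySem.List.pyRange 1 (↑(n + 1) + 1) 1
      = PySem.List.pyRange 1 (↑(n + 1)) 1 ++ [((n + 1 : Nat) : Int)] := by
    exact PySem.List.pyRange_one_succ_right (by exact_mod_cast Nat.succ_le_succ (Nat.zero_le n))
  have hsame : ((n : Int) + 1) = ((n + 1 : Nat) : Int) := by push_cast; ring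
  rw [hsplit, List.foldl_append]
  have hsame2 : PySem.List.pyRange 1 (↑(n + 1)) 1 = PySem.List.pyRange 1 (↑n + 1) 1 := by
    rw [hsame]
  rw [hsame2]
  simp only [List.foldl]
  split_ifs with hc
  · rw [sub_eq_add_neg]
  · rfl

theorem resNat : ∀ n : Nat, result (↑n : Int) = result_alt (↑n : Int) := by
  intro n
  induction n with
  | zero =>
    simp [result, result_alt, PySem.List.pyRange_one_eq_nil (by norm_num : (1 : Int) ≤ 1)]
  | succ n ih =>
    rw [result_step n, ih]
    have h1 : 1 ≤ n + 1 := Nat.succ_le_succ (Nat.zero_le n)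
    have := cf_step (n + 1) h1
    simp only [Nat.add_sub_cancel] at this
    rw [this]
    congr 1
    by_cases hq : (n + 1) &&& n = 0
    · have hA : isPowerofTwo ↑(n + 1) ≠ 0 := by
        rw [isPow_iff (n + 1) h1]
        exact hq
      rw [if_pos hA, if_pos hq]
    · have hA : ¬ (isPowerofTwo ↑(n + 1) ≠ 0) := by
        rw [isPow_iff (n + 1) h1]
        exact hq
      rw [if_neg hA, if_neg hq]

-- ===== VERDICT (by name: the statement is the Claim_ definition above) =====
theorem result_spec : Claim_equal_result := by
  intro t _
  unfold Spec_result
  by_cases ht : t < 1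
  · have hnil : PySem.List.pyRange 1 (t + 1) 1 = [] :=
      PySem.List.pyRange_one_eq_nil (by omega)
    rw [result, hnil, result_alt, if_pos ht]
    rfl
  · have h0 : 0 ≤ t := by omega
    have hts : t = ((t.toNat : Nat) : Int) := by omega
    rw [hts, resNat]
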